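-- pv_equiv track=rewrite | github.com/TomaszWs/Codewars | 8kyu/8kyu-interpreters-HQ9+.py | HQ9
-- ===== SOURCE A (Python) =====
-- def HQ9(code):
--     if code == "H":
--         return "Hello World!"
--     if code == "Q":
--         return "Q"
--     if code == "9":
--         result = ""
--         for n in range(99,2,-1):
--             result += f"{n} bottles of beer on the wall, {n} bottles of beer.\nTake one down and pass it around, {n-1} bottles of beer on the wall.\n"
--         result += "2 bottles of beer on the wall, 2 bottles of beer.\nTake one down and pass it around, 1 bottle of beer on the wall.\n1 bottle of beer on the wall, 1 bottle of beer.\nTake one down and pass it around, no more bottles of beer on the wall.\nNo more bottles of beer on the wall, no more bottles of beer.\nGo to the store and buy some more, 99 bottles of beer on the wall."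
--         return result
--     return None
-- ===== SOURCE B (Python) =====
-- def _bottles(n):
--     if n == 0:
--         return "no more bottles"
--     if n == 1:
--         return "1 bottle"
--     return f"{n} bottles"
--
--
-- def _verse(n):
--     if n == 0:
--         return "No more bottles of beer on the wall, no more bottles of beer.\nGo to the store and buy some more, 99 bottles of beer on the wall."
--     return f"{_bottles(n)} of beer on the wall, {_bottles(n)} of beer.\nTake one down and pass it around, {_bottles(n - 1)} of beer on the wall.\n"
--
--
-- def HQ9(code):
--     if code == "H":
--         return "Hello World!"
--     if code == "Q":
--         return "Q"
--     if code == "9":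
--         return "".join(_verse(n) for n in range(99, -1, -1))
--     return None
-- ===== Notes on version B (the rewrite author's own statement) =====
-- stated objective: simpler
-- what changed: The '9' branch's generic 99..3 loop plus a hard-coded four-verse tail string is replaced by one uniform loop over n from 99 down to 0 joining verses produced by a pluralization helper (N bottles / 1 bottle / no more bottles, with the 0-verse carrying the store line).
import Mathlib
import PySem

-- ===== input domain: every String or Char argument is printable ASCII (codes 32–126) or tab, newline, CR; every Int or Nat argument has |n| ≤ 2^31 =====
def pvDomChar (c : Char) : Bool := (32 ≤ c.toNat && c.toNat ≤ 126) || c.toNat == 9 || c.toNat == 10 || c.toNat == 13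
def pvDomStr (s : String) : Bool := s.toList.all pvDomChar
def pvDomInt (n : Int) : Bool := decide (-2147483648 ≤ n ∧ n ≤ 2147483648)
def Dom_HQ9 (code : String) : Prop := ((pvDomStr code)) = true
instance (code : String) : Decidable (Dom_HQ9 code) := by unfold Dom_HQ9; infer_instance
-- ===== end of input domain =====

-- B replaces A's generic 99..3 loop with a hard-coded four-verse tail by one uniform loop from 99
-- down to 0 over a pluralization helper (objective: simpler decomposition, same cost).

-- ===== PORT A =====
def HQ9 (code : String) : Option String :=
  if code = "H" then some "Hello World!"
  else if code = "Q" then some "Q"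
  else if code = "9" then
    -- result = ""; for n in range(99, 2, -1): result += f"{n} bottles ... {n-1} ... wall.\n"
    let result := (PySem.List.pyRange 99 2 (-1)).foldl
      (fun result n =>
        result ++ PySem.Int.toStr n ++ " bottles of beer on the wall, " ++ PySem.Int.toStr n ++
        " bottles of beer.\nTake one down and pass it around, " ++ PySem.Int.toStr (n - 1) ++
        " bottles of beer on the wall.\n") ""
    let result := result ++ "2 bottles of beer on the wall, 2 bottles of beer.\nTake one down and pass it around, 1 bottle of beer on the wall.\n1 bottle of beer on the wall, 1 bottle of beer.\nTake one down and pass it around, no more bottles of beer on the wall.\nNo more bottles of beer on the wall, no more bottles of beer.\nGo to the store and buy some more, 99 bottles of beer on the wall."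
    some result
  else none

-- ===== PORT B =====
def pvBottles (n : Int) : String :=
  if n = 0 then "no more bottles"
  else if n = 1 then "1 bottle"
  else PySem.Int.toStr n ++ " bottles"

def pvVerse (n : Int) : String :=
  if n = 0 then
    "No more bottles of beer on the wall, no more bottles of beer.\nGo to the store and buy some more, 99 bottles of beer on the wall."
  else
    pvBottles n ++ " of beer on the wall, " ++ pvBottles n ++
    " of beer.\nTake one down and pass it around, " ++ pvBottles (n - 1) ++
    " of beer on the wall.\n"

def HQ9_alt (code : String) : Option String :=
  if code = "H" then some "Hello World!"
  else if code = "Q" then some "Q"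
  else if code = "9" then
    some (PySem.Str.join "" ((PySem.List.pyRange 99 (-1) (-1)).map pvVerse))
  else none

-- ===== PRECONDITION & SPEC =====
def Spec_HQ9 (code : String) (out : Option String) : Prop := out = HQ9_alt code
instance (code : String) (out : Option String) : Decidable (Spec_HQ9 code out) := by unfold Spec_HQ9; infer_instance

-- ===== CLAIM (what is proved, stated in full; the proofs are below) =====
def Claim_equal_HQ9 : Prop := ∀ (code : String), Dom_HQ9 code → Spec_HQ9 code (HQ9 code)

-- ===== LEMMAS AND PROOFS =====
theorem join_nil_cons (x : List Char) (xs : List (List Char)) :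
    PySem.Chars.join [] (x :: xs) = x ++ PySem.Chars.join [] xs := by
  cases xs with
  | nil => simp [PySem.Chars.join_singleton, PySem.Chars.join_nil]
  | cons y ys => simp [PySem.Chars.join_cons_cons]

theorem join_nil_append (xs ys : List (List Char)) :
    PySem.Chars.join [] (xs ++ ys) = PySem.Chars.join [] xs ++ PySem.Chars.join [] ys := by
  induction xs with
  | nil => simp [PySem.Chars.join_nil]
  | cons x xs ih => simp [join_nil_cons, ih, List.append_assoc]

theorem verse_acc (acc : String) (n : Int) (h : 3 ≤ n) :
    (acc ++ PySem.Int.toStr n ++ " bottles of beer on the wall, " ++ PySem.Int.toStr n ++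
      " bottles of beer.\nTake one down and pass it around, " ++ PySem.Int.toStr (n - 1) ++
      " bottles of beer on the wall.\n").toList = acc.toList ++ (pvVerse n).toList := by
  have h0 : ¬ n = 0 := by omega
  have h1 : ¬ n = 1 := by omega
  have h2 : ¬ n - 1 = 0 := by omega
  have h3 : ¬ n - 1 = 1 := by omega
  simp [pvVerse, pvBottles, h0, h1, h2, h3, String.toList_append, List.append_assoc]

theorem foldA (l : List Int) (h : ∀ n ∈ l, 3 ≤ n) : ∀ acc : String,
    (l.foldl
      (fun result n =>
        result ++ PySem.Int.toStr n ++ " bottles of beer on the wall, " ++ PySem.Int.toStr n ++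
        " bottles of beer.\nTake one down and pass it around, " ++ PySem.Int.toStr (n - 1) ++
        " bottles of beer on the wall.\n") acc).toList
    = acc.toList ++ PySem.Chars.join [] (l.map fun n => (pvVerse n).toList) := by
  induction l with
  | nil => intro acc; simp [PySem.Chars.join_nil]
  | cons n l ih =>
    intro acc
    have hn : 3 ≤ n := h n (by simp)
    rw [List.foldl_cons, ih (fun m hm => h m (by simp [hm]))]
    try simp only []
    rw [verse_acc acc n hn, List.map_cons, join_nil_cons, List.append_assoc]

set_option maxRecDepth 100000 in
theorem tail_toList :
    ("2 bottles of beer on the wall, 2 bottles of beer.\nTake one down and pass it around, 1 bottle of beer on the wall.\n1 bottle of beer on the wall, 1 bottle of beer.\nTake one down and pass it around, no more bottles of beer on the wall.\nNo more bottles of beer on the wall, no more bottles of beer.\nGo to the store and buy some more, 99 bottles of beer on the wall." : String).toList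
    = (pvVerse 2).toList ++ ((pvVerse 1).toList ++ (pvVerse 0).toList) := by decide

set_option maxRecDepth 40000 in
theorem range_split : PySem.List.pyRange 99 (-1) (-1) = PySem.List.pyRange 99 2 (-1) ++ [2, 1, 0] := by
  decide

set_option maxRecDepth 40000 in
theorem range_ge : ∀ n ∈ PySem.List.pyRange 99 2 (-1), 3 ≤ n := by decide

theorem nine_eq :
    ((PySem.List.pyRange 99 2 (-1)).foldl
      (fun result n =>
        result ++ PySem.Int.toStr n ++ " bottles of beer on the wall, " ++ PySem.Int.toStr n ++
        " bottles of beer.\nTake one down and pass it around, " ++ PySem.Int.toStr (n - 1) ++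
        " bottles of beer on the wall.\n") ""
      ++ "2 bottles of beer on the wall, 2 bottles of beer.\nTake one down and pass it around, 1 bottle of beer on the wall.\n1 bottle of beer on the wall, 1 bottle of beer.\nTake one down and pass it around, no more bottles of beer on the wall.\nNo more bottles of beer on the wall, no more bottles of beer.\nGo to the store and buy some more, 99 bottles of beer on the wall.")
    = PySem.Str.join "" ((PySem.List.pyRange 99 (-1) (-1)).map pvVerse) := by
  apply String.toList_inj.mp
  rw [String.toList_append, foldA _ range_ge "", tail_toList, PySem.Str.toList_join, range_split]
  simp [List.map_map, Function.comp_def, join_nil_append, join_nil_cons,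
    PySem.Chars.join_singleton, List.append_assoc]

-- ===== VERDICT (by name: the statement is the Claim_ definition above) =====
theorem HQ9_spec : Claim_equal_HQ9 := by
  intro code _
  unfold Spec_HQ9 HQ9 HQ9_alt
  split_ifs
  · rfl
  · rfl
  · exact congrArg some nine_eq
  · rfl
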